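-- pv_equiv track=rewrite | github.com/docxology/MetaInformAnt | src/metainformant/quality/analysis/contamination.py | detect_rrna_contamination
-- ===== SOURCE A (Python) =====
-- from typing import Any, Dict, List, Optional, Set, Tuple
--
-- def detect_rrna_contamination(
--     sequences: List[str],
--     custom_patterns: Optional[List[str]] = None,
-- ) -> Dict[str, Any]:
--     """Detect rRNA contamination. Returns {seq_idx: True}."""
--     patterns = custom_patterns or [
--         'GGAAGGAG',
--         'GTGCCAGCAGCCGCGGTAA',
--         'GACGGGCGGTGTGT',
--         'CCTACGGGAGGCAGCAG',
--     ]
--     results: Dict[str, Any] = {}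
--     for idx, seq in enumerate(sequences):
--         for pattern in patterns:
--             if pattern in seq.upper():
--                 results[str(idx)] = True
--                 break
--     return results
-- ===== SOURCE B (Python) =====
-- import re
-- from typing import Any, Dict, List, Optional
--
--
-- _DEFAULT_RRNA_PATTERNS = [
--     'GGAAGGAG',
--     'GTGCCAGCAGCCGCGGTAA',
--     'GACGGGCGGTGTGT',
--     'CCTACGGGAGGCAGCAG',
-- ]
--
--
-- def detect_rrna_contamination(
--     sequences: List[str],
--     custom_patterns: Optional[List[str]] = None,
-- ) -> Dict[str, Any]:
--     """Detect rRNA contamination. Returns {seq_idx: True}."""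
--     patterns = custom_patterns or _DEFAULT_RRNA_PATTERNS
--     compiled = re.compile("|".join(re.escape(p) for p in patterns))
--     return {str(i): True for i, seq in enumerate(sequences) if compiled.search(seq.upper())}
-- ===== Notes on version B (the rewrite author's own statement) =====
-- stated objective: idiomatic
-- what changed: Replaces the explicit nested for-loops with per-pattern scan-and-break and dict mutation by one precompiled regex alternation of the escaped patterns, searched once per sequence inside a dict comprehension.
import Mathlib
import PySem

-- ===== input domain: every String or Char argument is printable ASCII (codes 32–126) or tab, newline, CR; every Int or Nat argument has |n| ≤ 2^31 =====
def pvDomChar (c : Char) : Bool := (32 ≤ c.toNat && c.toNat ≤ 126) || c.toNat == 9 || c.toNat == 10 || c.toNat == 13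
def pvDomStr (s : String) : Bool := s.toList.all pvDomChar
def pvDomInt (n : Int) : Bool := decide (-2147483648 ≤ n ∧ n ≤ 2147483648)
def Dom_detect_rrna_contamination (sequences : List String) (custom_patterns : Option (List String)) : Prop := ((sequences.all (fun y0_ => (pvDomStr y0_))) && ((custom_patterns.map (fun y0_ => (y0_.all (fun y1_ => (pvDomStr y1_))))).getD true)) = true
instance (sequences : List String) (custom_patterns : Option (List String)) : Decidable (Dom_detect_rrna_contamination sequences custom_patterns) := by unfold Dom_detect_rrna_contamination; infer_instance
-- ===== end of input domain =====

-- B replaces A's per-pattern inner scan-and-break loop and dict mutation by a single combined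
-- regex (alternation of the escaped patterns) searched once per sequence inside a dict
-- comprehension (objective: idiomatic). Return values are equal; neither mutates its arguments.

-- ===== PORT A =====
-- inner loop `for pattern in patterns: if pattern in seq.upper(): results[str(idx)] = True; break`
def scanPatterns (patterns : List String) (idx : Int) (seq : String)
    (results : PySem.Dict String Bool) : PySem.Dict String Bool :=
  match patterns with
  | [] => results
  | pattern :: rest =>
    if PySem.Str.isIn pattern (PySem.Str.upper seq) then
      results.insert (PySem.Int.toStr idx) true
    else
      scanPatterns rest idx seq results

def detect_rrna_contamination (sequences : List String) (custom_patterns : Option (List String)) : List (String × Bool) :=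
  -- `patterns = custom_patterns or [...]`: None and the empty list fall back to the default list
  let patterns : List String :=
    match custom_patterns with
    | some ps => if ps.isEmpty then
        ["GGAAGGAG", "GTGCCAGCAGCCGCGGTAA", "GACGGGCGGTGTGT", "CCTACGGGAGGCAGCAG"]
      else ps
    | none => ["GGAAGGAG", "GTGCCAGCAGCCGCGGTAA", "GACGGGCGGTGTGT", "CCTACGGGAGGCAGCAG"]
  ((PySem.List.enumerate sequences).foldl
      (fun results is => scanPatterns patterns is.1 is.2 results)
      PySem.Dict.empty).items

-- ===== PORT B =====
def rrnaDefaultPatterns : List String :=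
  ["GGAAGGAG", "GTGCCAGCAGCCGCGGTAA", "GACGGGCGGTGTGT", "CCTACGGGAGGCAGCAG"]

-- `compiled.search(s)` for `compiled = re.compile("|".join(re.escape(p) for p in patterns))`:
-- an alternation of escaped literals matches s iff some alternative occurs in s as a literal
-- substring (exact for the nonempty pattern lists this port passes in).
def regexAltSearch (patterns : List String) (s : String) : Bool :=
  patterns.any (fun p => PySem.Str.isIn p s)

def detect_rrna_contamination_alt (sequences : List String) (custom_patterns : Option (List String)) : List (String × Bool) :=
  let patterns : List String :=
    match custom_patterns with
    | some ps => if ps.isEmpty then rrnaDefaultPatterns else ps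
    | none => rrnaDefaultPatterns
  -- the dict comprehension's keys str(i) are pairwise distinct, so it builds exactly this
  -- insertion-order association list
  (PySem.List.enumerate sequences).filterMap
    (fun is =>
      if regexAltSearch patterns (PySem.Str.upper is.2) then
        some (PySem.Int.toStr is.1, true)
      else none)

-- ===== PRECONDITION & SPEC =====
def Spec_detect_rrna_contamination (sequences : List String) (custom_patterns : Option (List String)) (out : List (String × Bool)) : Prop := out = detect_rrna_contamination_alt sequences custom_patterns
instance (sequences : List String) (custom_patterns : Option (List String)) (out : List (String × Bool)) : Decidable (Spec_detect_rrna_contamination sequences custom_patterns out) := by unfold Spec_detect_rrna_contamination; infer_instance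

-- ===== CLAIM (what is proved, stated in full; the proofs are below) =====
def Claim_equal_detect_rrna_contamination : Prop := ∀ (sequences : List String) (custom_patterns : Option (List String)), Dom_detect_rrna_contamination sequences custom_patterns → Spec_detect_rrna_contamination sequences custom_patterns (detect_rrna_contamination sequences custom_patterns)

-- ===== LEMMAS AND PROOFS =====

-- `Nat.toDigits 10` round-trips through its decimal value, hence `str` is injective.

theorem toDigitsCore_ten_append (f : Nat) : ∀ (n : Nat) (ds : List Char),
    Nat.toDigitsCore 10 f n ds = Nat.toDigitsCore 10 f n [] ++ ds := by
  induction f with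
  | zero => intro n ds; simp [Nat.toDigitsCore]
  | succ f ih =>
    intro n ds
    simp only [Nat.toDigitsCore]
    split
    · simp
    · rw [ih (n / 10) ((n % 10).digitChar :: ds), ih (n / 10) [(n % 10).digitChar]]
      simp

theorem toDigitsCore_ten_fuel : ∀ (n f f' : Nat), n < f → n < f' →
    Nat.toDigitsCore 10 f n [] = Nat.toDigitsCore 10 f' n [] := by
  intro n
  induction n using Nat.strong_induction_on with
  | _ n ih =>
    intro f f' hf hf'
    match f, f' with
    | f + 1, f' + 1 =>
      simp only [Nat.toDigitsCore]
      split
      · rfl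
      · rename_i hne
        rw [toDigitsCore_ten_append f, toDigitsCore_ten_append f',
          ih (n / 10) (by omega) f f' (by omega) (by omega)]

theorem toDigits_ten_rec (n : Nat) :
    Nat.toDigits 10 n =
      (if n / 10 = 0 then [] else Nat.toDigits 10 (n / 10)) ++ [(n % 10).digitChar] := by
  show Nat.toDigitsCore 10 (n + 1) n [] = _
  simp only [Nat.toDigitsCore]
  split
  · simp
  · rename_i hne
    rw [toDigitsCore_ten_append n, toDigitsCore_ten_fuel (n / 10) n (n / 10 + 1) (by omega) (by omega)]
    rfl

def decVal (l : List Char) : Nat := l.foldl (fun a c => a * 10 + (c.toNat - 48)) 0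

theorem decVal_append_digit (l : List Char) (c : Char) :
    decVal (l ++ [c]) = decVal l * 10 + (c.toNat - 48) := by
  simp [decVal, List.foldl_append]

theorem decVal_toDigits_ten : ∀ n : Nat, decVal (Nat.toDigits 10 n) = n := by
  intro n
  induction n using Nat.strong_induction_on with
  | _ n ih =>
    rw [toDigits_ten_rec n]
    by_cases h : n / 10 = 0
    · have h10 : n < 10 := by omega
      simp only [h, if_pos]
      interval_cases n <;> decide
    · rw [if_neg h, decVal_append_digit, ih (n / 10) (by omega)]
      have hd : (n % 10).digitChar.toNat - 48 = n % 10 := by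
        have : n % 10 < 10 := by omega
        interval_cases h' : n % 10 <;> simp_all [Nat.digitChar]
      omega

theorem toDigits_ten_inj (m n : Nat) (h : Nat.toDigits 10 m = Nat.toDigits 10 n) : m = n := by
  have := decVal_toDigits_ten m
  rw [h, decVal_toDigits_ten n] at this
  omega

theorem toStr_inj_of_nonneg (i j : Int) (hi : 0 ≤ i) (hj : 0 ≤ j)
    (h : PySem.Int.toStr i = PySem.Int.toStr j) : i = j := by
  have hc : PySem.Int.toChars i = PySem.Int.toChars j := by
    have := congrArg String.toList h
    simpa [PySem.Int.toList_toStr] using this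
  unfold PySem.Int.toChars at hc
  rw [if_neg (by omega), if_neg (by omega)] at hc
  have := toDigits_ten_inj i.toNat j.toNat hc
  omega

-- the inner break-loop IS an `any` test
theorem scanPatterns_eq (patterns : List String) (idx : Int) (seq : String)
    (d : PySem.Dict String Bool) :
    scanPatterns patterns idx seq d =
      if patterns.any (fun p => PySem.Str.isIn p (PySem.Str.upper seq)) then
        d.insert (PySem.Int.toStr idx) true
      else d := by
  induction patterns with
  | nil => simp [scanPatterns]
  | cons p rest ih =>
    simp only [scanPatterns, List.any_cons, ih]
    by_cases hp : PySem.Str.isIn p (PySem.Str.upper seq) = true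
    · simp only [hp]; simp
    · simp only [Bool.not_eq_true] at hp
      simp only [hp]; simp

-- A's fold over the enumeration, started at any index with any dict fresh for the coming
-- keys, appends exactly B's filterMap of the remaining enumeration
theorem foldl_scan_eq (patterns : List String) :
    ∀ (xs : List String) (s : Int) (d : PySem.Dict String Bool), 0 ≤ s →
    (∀ k : Int, s ≤ k → d.contains (PySem.Int.toStr k) = false) →
    ((PySem.List.enumerate xs s).foldl
        (fun results is => scanPatterns patterns is.1 is.2 results) d).items =
      d.items ++ (PySem.List.enumerate xs s).filterMap
        (fun is =>
          if regexAltSearch patterns (PySem.Str.upper is.2) then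
            some (PySem.Int.toStr is.1, true)
          else none) := by
  intro xs
  induction xs with
  | nil => intro s d _ _; simp [PySem.List.enumerate_nil]
  | cons x xs ih =>
    intro s d hs hfresh
    rw [PySem.List.enumerate_cons]
    simp only [List.foldl_cons, List.filterMap_cons, regexAltSearch]
    rw [scanPatterns_eq]
    by_cases hc : (patterns.any fun p => PySem.Str.isIn p (PySem.Str.upper x)) = true
    · rw [if_pos hc, if_pos hc,
        ih (s + 1) _ (by omega) (fun k hk => by
          rw [PySem.Dict.contains_insert]
          have hne : PySem.Int.toStr k ≠ PySem.Int.toStr s := fun h => by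
            have := toStr_inj_of_nonneg k s (by omega) hs h; omega
          simp [hne, hfresh k (by omega)]),
        PySem.Dict.items_insert_of_not_contains _ _ (hfresh s le_rfl)]
      simp [regexAltSearch]
    · rw [if_neg hc, if_neg hc, ih (s + 1) d (by omega) (fun k hk => hfresh k (by omega))]
      simp [regexAltSearch]

-- ===== VERDICT (by name: the statement is the Claim_ definition above) =====
theorem detect_rrna_contamination_spec : Claim_equal_detect_rrna_contamination := by
  intro sequences custom_patterns _
  unfold Spec_detect_rrna_contamination detect_rrna_contamination detect_rrna_contamination_alt
  have h : ∀ pats : List String,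
      ((PySem.List.enumerate sequences).foldl
          (fun results is => scanPatterns pats is.1 is.2 results) PySem.Dict.empty).items =
        (PySem.List.enumerate sequences).filterMap
          (fun is =>
            if regexAltSearch pats (PySem.Str.upper is.2) then
              some (PySem.Int.toStr is.1, true)
            else none) := by
    intro pats
    rw [foldl_scan_eq pats sequences 0 PySem.Dict.empty le_rfl
      (fun k _ => PySem.Dict.contains_empty _)]
    simp [PySem.Dict.empty]
  cases custom_patterns with
  | none =>
    exact h ["GGAAGGAG", "GTGCCAGCAGCCGCGGTAA", "GACGGGCGGTGTGT", "CCTACGGGAGGCAGCAG"]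
  | some ps =>
    by_cases hps : ps.isEmpty = true
    · simp only [hps, if_true, rrnaDefaultPatterns]
      exact h ["GGAAGGAG", "GTGCCAGCAGCCGCGGTAA", "GACGGGCGGTGTGT", "CCTACGGGAGGCAGCAG"]
    · simp only [hps, if_false, rrnaDefaultPatterns, Bool.false_eq_true]
      exact h ps
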